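-- pv_equiv track=rewrite | github.com/HSJung93/-Python-CodingPractices | boj/string_semiPalin_boj17609.py | isPalinOrSemiPalin
-- ===== SOURCE A (Python) =====
-- def isPalin(w, l, r):
--     while l < r:
--         if w[l] == w[r]:
--             l += 1
--             r -= 1
--         else:
--             return False
--     return True
--
-- def isPalinOrSemiPalin(w, l, r):
--     while l < r:
--         if w[l] == w[r]:
--             l += 1
--             r -= 1
--         else:
--             del_left = isPalin(w, l+1, r)
--             del_right = isPalin(w, l, r-1)
--             if del_left or del_right:
--                 return 1
--             else:
--                 return 2
--     return 0
-- ===== SOURCE B (Python) =====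
-- def isPalinOrSemiPalin(w, l, r):
--     if l >= r:
--         return 0
--     s = w[l:r+1]
--     if s == s[::-1]:
--         return 0
--     for k in range(len(s)):
--         t = s[:k] + s[k+1:]
--         if t == t[::-1]:
--             return 1
--     return 2
-- ===== Notes on version B (the rewrite author's own statement) =====
-- stated objective: simpler
-- what changed: Replaces A's first-mismatch two-pointer walk with its two targeted isPalin calls by a direct encoding of the definition: extract the window w[l:r+1] once, test it against its reverse, and otherwise brute-force every single-character deletion s[:k]+s[k+1:] for a palindrome.
-- outside the precondition, e.g. on isPalinOrSemiPalin('abcd', -1, 2): A returns 2, B returns 0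
import Mathlib
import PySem

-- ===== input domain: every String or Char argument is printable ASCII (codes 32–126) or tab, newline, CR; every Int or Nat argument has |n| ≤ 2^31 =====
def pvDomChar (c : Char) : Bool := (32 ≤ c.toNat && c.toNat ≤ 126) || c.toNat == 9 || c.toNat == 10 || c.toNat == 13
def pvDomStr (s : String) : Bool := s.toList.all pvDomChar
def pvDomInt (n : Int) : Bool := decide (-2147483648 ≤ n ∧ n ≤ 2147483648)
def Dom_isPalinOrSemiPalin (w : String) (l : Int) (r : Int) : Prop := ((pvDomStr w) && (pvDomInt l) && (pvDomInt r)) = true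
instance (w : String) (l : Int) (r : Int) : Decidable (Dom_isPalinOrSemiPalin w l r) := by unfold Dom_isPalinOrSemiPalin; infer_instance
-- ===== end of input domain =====

-- B replaces A's first-mismatch walk + two targeted checks by a brute-force scan over
-- every single-character deletion of the window (objective: simpler). Equivalence on Pre_.

-- ===== PORT A =====
-- isPalin(w, l, r): two-pointer palindrome check on w between indices l and r.
def isPalinLoop (w : List Char) (l : Int) (r : Int) : Bool :=
  if _h : l < r then
    match PySem.List.pyGet? w l, PySem.List.pyGet? w r with
    | some a, some b => if a = b then isPalinLoop w (l + 1) (r - 1) else false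
    | _, _ => false   -- Python raises IndexError here; excluded by Pre_
  else true
termination_by (r - l).toNat
decreasing_by omega

-- the while-loop of isPalinOrSemiPalin
def semiLoop (w : List Char) (l : Int) (r : Int) : Int :=
  if _h : l < r then
    match PySem.List.pyGet? w l, PySem.List.pyGet? w r with
    | some a, some b =>
        if a = b then semiLoop w (l + 1) (r - 1)
        else if isPalinLoop w (l + 1) r || isPalinLoop w l (r - 1) then 1 else 2
    | _, _ => 0   -- Python raises IndexError here; excluded by Pre_
  else 0
termination_by (r - l).toNat
decreasing_by omega

def isPalinOrSemiPalin (w : String) (l : Int) (r : Int) : Int :=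
  semiLoop w.toList l r

-- ===== PORT B =====
-- the 'for k in range(len(s))' loop of Source B: try deleting each position k
def bruteLoop (s : List Char) (k : Nat) : Int :=
  if _h : k < s.length then
    if s.take k ++ s.drop (k + 1) = (s.take k ++ s.drop (k + 1)).reverse then 1
    else bruteLoop s (k + 1)
  else 2
termination_by s.length - k

def isPalinOrSemiPalin_alt (w : String) (l : Int) (r : Int) : Int :=
  if l ≥ r then 0
  else
    let s := PySem.List.slice w.toList (some l) (some (r + 1))
    if s = s.reverse then 0 else bruteLoop s 0

-- ===== PRECONDITION & SPEC =====
-- Pre_ is the natural index domain of this BOJ helper: a trivial window (l ≥ r, where A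
-- returns 0 without indexing) or 0 ≤ l < r < len(w).  Outside it A either raises
-- IndexError or (for in-range NEGATIVE l with l < r) returns an accidental value via
-- Python's negative-index wraparound, comparing a suffix character against a prefix one —
-- a corner no caller intends, on which B's slice-based reading gives a different,
-- equally accidental, value (see cites).
def Pre_isPalinOrSemiPalin (w : String) (l : Int) (r : Int) : Prop :=
  r ≤ l ∨ (0 ≤ l ∧ r < (w.toList.length : Int))
instance (w : String) (l : Int) (r : Int) : Decidable (Pre_isPalinOrSemiPalin w l r) := by
  unfold Pre_isPalinOrSemiPalin; infer_instance

def pvWitness_isPalinOrSemiPalin : String × Int × Int := ("abca", 0, 3)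

def Spec_isPalinOrSemiPalin (w : String) (l : Int) (r : Int) (out : Int) : Prop := out = isPalinOrSemiPalin_alt w l r
instance (w : String) (l : Int) (r : Int) (out : Int) : Decidable (Spec_isPalinOrSemiPalin w l r out) := by unfold Spec_isPalinOrSemiPalin; infer_instance

-- ===== CLAIM (what is proved, stated in full; the proofs are below) =====
def Claim_equal_isPalinOrSemiPalin : Prop := ∀ (w : String) (l : Int) (r : Int), Dom_isPalinOrSemiPalin w l r → Pre_isPalinOrSemiPalin w l r → Spec_isPalinOrSemiPalin w l r (isPalinOrSemiPalin w l r)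

-- ===== LEMMAS AND PROOFS =====

-- "some deletion at position ≥ k yields a palindrome" (proof-side characterisation of bruteLoop)
def ExDel (s : List Char) (k : Nat) : Prop :=
  ∃ j, k ≤ j ∧ j < s.length ∧ s.eraseIdx j = (s.eraseIdx j).reverse

-- its boolean form (used in the characterised if-expressions)
def exDel (s : List Char) (k : Nat) : Bool :=
  (List.range s.length).any fun j =>
    decide (k ≤ j) && decide (s.eraseIdx j = (s.eraseIdx j).reverse)

theorem exDel_iff (s : List Char) (k : Nat) : exDel s k = true ↔ ExDel s k := by
  simp [exDel, ExDel, List.any_eq_true, List.mem_range]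
  constructor
  · rintro ⟨j, hj, hk, hp⟩; exact ⟨j, hk, hj, hp⟩
  · rintro ⟨j, hk, hj, hp⟩; exact ⟨j, hj, hk, hp⟩

-- a list of length ≤ 1 is a palindrome
theorem pal_short {α : Type} (s : List α) (h : s.length ≤ 1) : s = s.reverse := by
  match s, h with
  | [], _ => rfl
  | [a], _ => rfl

-- sandwich palindrome characterisation
theorem pal_sandwich {α : Type} (a b : α) (m : List α) :
    a :: m ++ [b] = (a :: m ++ [b]).reverse ↔ a = b ∧ m = m.reverse := by
  constructor
  · intro h
    have hrev : (a :: m ++ [b]).reverse = b :: m.reverse ++ [a] := by simp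
    rw [hrev] at h
    have hab : a = b := by exact (List.cons.injEq _ _ _ _).mp h |>.1
    have htl : m ++ [b] = m.reverse ++ [a] := (List.cons.injEq _ _ _ _).mp h |>.2
    have hlen : m.length = m.reverse.length := by simp
    have := List.append_inj htl hlen
    exact ⟨hab, this.1⟩
  · rintro ⟨rfl, hm⟩
    conv_lhs => rw [hm]
    simp

-- peel the head of a window slice
theorem win_head (w : List Char) (l r : Int) (h0 : 0 ≤ l) (hlr : l ≤ r)
    (hl : l.toNat < w.length) :
    PySem.List.slice w (some l) (some (r + 1)) =
      w[l.toNat] :: PySem.List.slice w (some (l + 1)) (some (r + 1)) := by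
  rw [PySem.List.slice_toNat w h0 (by omega), PySem.List.slice_toNat w (by omega) (by omega)]
  rw [List.drop_eq_getElem_cons hl]
  rw [show (r+1).toNat - l.toNat = ((r+1).toNat - (l+1).toNat) + 1 by omega]
  rw [List.take_succ_cons]
  have : (l+1).toNat = l.toNat + 1 := by omega
  rw [this]

-- peel the last element of a window slice
theorem win_last (w : List Char) (l r : Int) (h0 : 0 ≤ l) (hlr : l ≤ r)
    (hr : r.toNat < w.length) :
    PySem.List.slice w (some l) (some (r + 1)) =
      PySem.List.slice w (some l) (some r) ++ [w[r.toNat]] := by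
  rw [PySem.List.slice_toNat w h0 (by omega), PySem.List.slice_toNat w h0 (by omega)]
  rw [show (r+1).toNat - l.toNat = r.toNat - l.toNat + 1 by omega]
  rw [List.take_add_one]
  congr 1
  have hlt : r.toNat - l.toNat < (w.drop l.toNat).length := by
    simp [List.length_drop]; omega
  rw [List.getElem?_eq_getElem hlt]
  simp [List.getElem_drop]
  congr 2
  omega

-- full window decomposition
theorem win_decomp (w : List Char) (l r : Int) (h0 : 0 ≤ l) (hlr : l < r)
    (hl : l.toNat < w.length) (hr : r.toNat < w.length) :
    PySem.List.slice w (some l) (some (r + 1)) =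
      w[l.toNat] :: PySem.List.slice w (some (l + 1)) (some r) ++ [w[r.toNat]] := by
  rw [win_head w l r h0 (by omega) hl, win_last w (l+1) r (by omega) (by omega) hr]
  rfl

-- a trivial window is short
theorem win_short (w : List Char) (l r : Int) (h0 : 0 ≤ l) (hrl : r ≤ l) (hlr : l ≤ r + 1) :
    (PySem.List.slice w (some l) (some (r + 1))).length ≤ 1 := by
  rw [PySem.List.slice_toNat w h0 (by omega)]
  simp only [List.length_take, List.length_drop]
  omega

-- isPalinLoop computes palindromicity of the window
theorem isPalinLoop_iff (w : List Char) (l r : Int) (h0 : 0 ≤ l)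
    (hr : r < (w.length : Int)) (hlr : l ≤ r + 1) :
    isPalinLoop w l r = true ↔
      PySem.List.slice w (some l) (some (r + 1)) =
        (PySem.List.slice w (some l) (some (r + 1))).reverse := by
  generalize hk : (r - l).toNat = k
  induction k using Nat.strong_induction_on generalizing l r with
  | _ k IH =>
    by_cases hlt : l < r
    · have hl' : l.toNat < w.length := by omega
      have hr' : r.toNat < w.length := by omega
      have hgl := PySem.List.pyGet?_eq_some_getElem w h0 (by omega : l < (w.length : Int))
      have hgr := PySem.List.pyGet?_eq_some_getElem w (by omega : (0:Int) ≤ r) hr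
      rw [isPalinLoop, dif_pos hlt, hgl, hgr]
      rw [win_decomp w l r h0 hlt hl' hr']
      rw [pal_sandwich]
      simp only []
      by_cases heq : w[l.toNat] = w[r.toNat]
      · rw [if_pos heq]
        have hm : (r - 1 - (l + 1)).toNat < k := by omega
        have := IH _ hm (l + 1) (r - 1) (by omega) (by omega) (by omega) rfl
        rw [show r - 1 + 1 = r by ring] at this
        rw [this]
        simp [heq]
      · rw [if_neg heq]
        simp [heq]
    · rw [isPalinLoop, dif_neg hlt]
      have hpal := pal_short _ (win_short w l r h0 (by omega) hlr)
      exact iff_of_true rfl hpal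

-- bruteLoop answers "does some deletion at a position ≥ k give a palindrome?"
theorem bruteLoop_eq (s : List Char) (k : Nat) :
    bruteLoop s k = if exDel s k then 1 else 2 := by
  generalize hk : s.length - k = n
  induction n using Nat.strong_induction_on generalizing k with
  | _ n IH =>
    by_cases h : k < s.length
    · rw [bruteLoop, dif_pos h, ← List.eraseIdx_eq_take_drop_succ]
      by_cases hp : s.eraseIdx k = (s.eraseIdx k).reverse
      · rw [if_pos hp, if_pos ((exDel_iff s k).mpr ⟨k, le_rfl, h, hp⟩)]
      · rw [if_neg hp, IH (s.length - (k + 1)) (by omega) (k + 1) rfl]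
        by_cases hex : ExDel s (k + 1)
        · obtain ⟨j, hj1, hj2, hj3⟩ := hex
          rw [if_pos ((exDel_iff s (k+1)).mpr ⟨j, hj1, hj2, hj3⟩),
              if_pos ((exDel_iff s k).mpr ⟨j, by omega, hj2, hj3⟩)]
        · rw [if_neg (mt (exDel_iff s (k+1)).mp hex), if_neg (mt (exDel_iff s k).mp ?_)]
          rintro ⟨j, hj1, hj2, hj3⟩
          rcases Nat.eq_or_lt_of_le hj1 with rfl | hlt
          · exact hp hj3
          · exact hex ⟨j, hlt, hj2, hj3⟩
    · rw [bruteLoop, dif_neg h, if_neg (mt (exDel_iff s k).mp ?_)]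
      rintro ⟨j, hj1, hj2, _⟩
      omega

-- eraseIdx of a sandwich, interior position
theorem erase_sandwich_mid (c d : Char) (m : List Char) (j : Nat) (hj : j < m.length) :
    (c :: m ++ [d]).eraseIdx (j + 1) = c :: (m.eraseIdx j ++ [d]) := by
  show (c :: (m ++ [d])).eraseIdx (j + 1) = c :: (m.eraseIdx j ++ [d])
  rw [List.eraseIdx_cons_succ, List.eraseIdx_append_of_lt_length hj]

-- eraseIdx of a sandwich, last position
theorem erase_sandwich_last (c d : Char) (m : List Char) :
    (c :: m ++ [d]).eraseIdx (m.length + 1) = c :: m := by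
  show (c :: (m ++ [d])).eraseIdx (m.length + 1) = c :: m
  rw [List.eraseIdx_cons_succ, List.eraseIdx_append_of_length_le le_rfl]
  simp

-- mismatched ends: a deletion fixes the string iff deleting one of the two ends does
theorem exDel_mismatch (a b : Char) (m : List Char) (hab : a ≠ b) :
    ExDel (a :: m ++ [b]) 0 ↔
      (m ++ [b] = (m ++ [b]).reverse ∨ a :: m = (a :: m).reverse) := by
  constructor
  · rintro ⟨j, -, hj2, hj3⟩
    match j with
    | 0 => exact Or.inl hj3
    | j + 1 =>
      have hlen : (a :: m ++ [b]).length = m.length + 2 := by simp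
      rcases Nat.lt_or_ge j m.length with hlt | hge
      · rw [erase_sandwich_mid a b m j hlt] at hj3
        exact absurd ((pal_sandwich a b (m.eraseIdx j)).mp hj3).1 hab
      · have hje : j = m.length := by omega
        subst hje
        rw [erase_sandwich_last a b m] at hj3
        exact Or.inr hj3
  · rintro (h | h)
    · exact ⟨0, le_rfl, by simp, h⟩
    · exact ⟨m.length + 1, by omega, by simp, by rw [erase_sandwich_last a b m]; exact h⟩
  
-- matched ends around a non-palindromic middle: a deletion fixes the sandwich iff one fixes the middle
theorem exDel_sandwich (c : Char) (m : List Char) (hm : m ≠ m.reverse) :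
    ExDel (c :: m ++ [c]) 0 ↔ ExDel m 0 := by
  have hmne : m ≠ [] := by rintro rfl; exact hm rfl
  constructor
  · rintro ⟨j, -, hj2, hj3⟩
    match j with
    | 0 =>
      obtain ⟨m0, m', rfl⟩ : ∃ x xs, m = x :: xs := by
        cases m with
        | nil => exact absurd rfl hmne
        | cons x xs => exact ⟨x, xs, rfl⟩
      have : m0 :: m' ++ [c] = (m0 :: m' ++ [c]).reverse := hj3
      have hp := (pal_sandwich m0 c m').mp this
      exact ⟨0, le_rfl, by simp, hp.2⟩
    | j + 1 =>
      have hlen : (c :: m ++ [c]).length = m.length + 2 := by simp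
      rcases Nat.lt_or_ge j m.length with hlt | hge
      · rw [erase_sandwich_mid c c m j hlt] at hj3
        exact ⟨j, by omega, hlt, ((pal_sandwich c c (m.eraseIdx j)).mp hj3).2⟩
      · have hje : j = m.length := by omega
        subst hje
        rw [erase_sandwich_last c c m] at hj3
        obtain ⟨m'', lst, rfl⟩ := List.eq_nil_or_concat m |>.resolve_left hmne
        simp only [List.concat_eq_append] at hj3 ⊢
        have hp := (pal_sandwich c lst m'').mp hj3
        refine ⟨m''.length, by omega, by simp, ?_⟩
        rw [List.eraseIdx_append_of_length_le le_rfl]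
        simpa using hp.2
  · rintro ⟨j, -, hj2, hj3⟩
    refine ⟨j + 1, by omega, by simp; omega, ?_⟩
    rw [erase_sandwich_mid c c m j hj2]
    exact (pal_sandwich c c (m.eraseIdx j)).mpr ⟨rfl, hj3⟩

-- the characterised form of B's classification of the window
theorem semiLoop_eq (w : List Char) (l r : Int) (h0 : 0 ≤ l)
    (hr : r < (w.length : Int)) (hlr : l ≤ r + 1) :
    semiLoop w l r =
      (if PySem.List.slice w (some l) (some (r + 1)) =
            (PySem.List.slice w (some l) (some (r + 1))).reverse then 0
       else if exDel (PySem.List.slice w (some l) (some (r + 1))) 0 then 1 else 2) := by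
  generalize hk : (r - l).toNat = k
  induction k using Nat.strong_induction_on generalizing l r with
  | _ k IH =>
    by_cases hlt : l < r
    · have hl' : l.toNat < w.length := by omega
      have hr' : r.toNat < w.length := by omega
      rw [semiLoop, dif_pos hlt,
          PySem.List.pyGet?_eq_some_getElem w h0 (by omega : l < (w.length : Int)),
          PySem.List.pyGet?_eq_some_getElem w (by omega : (0:Int) ≤ r) hr]
      simp only []
      rw [win_decomp w l r h0 hlt hl' hr']
      by_cases heq : w[l.toNat] = w[r.toNat]
      · rw [if_pos heq]
        have hm : (r - 1 - (l + 1)).toNat < k := by omega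
        have ih := IH _ hm (l + 1) (r - 1) (by omega) (by omega) (by omega) rfl
        rw [show r - 1 + 1 = r by ring] at ih
        rw [ih, heq]
        set mid := PySem.List.slice w (some (l + 1)) (some r) with hmid
        by_cases hp : mid = mid.reverse
        · rw [if_pos hp, if_pos ((pal_sandwich _ _ _).mpr ⟨rfl, hp⟩)]
        · rw [if_neg hp, if_neg (fun h => hp ((pal_sandwich _ _ _).mp h).2)]
          by_cases hex : ExDel mid 0
          · rw [if_pos ((exDel_iff mid 0).mpr hex),
                if_pos ((exDel_iff _ 0).mpr ((exDel_sandwich w[r.toNat] mid hp).mpr hex))]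
          · rw [if_neg (mt (exDel_iff mid 0).mp hex),
                if_neg (mt (fun hh => (exDel_sandwich w[r.toNat] mid hp).mp ((exDel_iff _ 0).mp hh)) hex)]
      · rw [if_neg heq]
        have hnp : ¬(w[l.toNat] :: PySem.List.slice w (some (l + 1)) (some r) ++ [w[r.toNat]] =
            (w[l.toNat] :: PySem.List.slice w (some (l + 1)) (some r) ++ [w[r.toNat]]).reverse) :=
          fun h => heq ((pal_sandwich _ _ _).mp h).1
        rw [if_neg hnp]
        -- relate A's two isPalin calls to the two end-deletions
        have hini : PySem.List.slice w (some l) (some r) =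
            w[l.toNat] :: PySem.List.slice w (some (l + 1)) (some r) := by
          have h := win_head w l (r - 1) h0 (by omega) hl'
          rw [show r - 1 + 1 = r by ring] at h
          exact h
        have hwl := win_last w (l + 1) r (by omega) (by omega) hr'
        have h1 := isPalinLoop_iff w (l + 1) r (by omega) hr (by omega)
        rw [hwl] at h1
        have h2 := isPalinLoop_iff w l (r - 1) h0 (by omega) (by omega)
        rw [show r - 1 + 1 = r by ring, hini] at h2
        have hcond : ((isPalinLoop w (l + 1) r || isPalinLoop w l (r - 1)) = true) ↔
            ExDel (w[l.toNat] :: PySem.List.slice w (some (l + 1)) (some r) ++ [w[r.toNat]]) 0 := by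
          rw [Bool.or_eq_true, h1, h2, exDel_mismatch _ _ _ heq]
        by_cases hor : ExDel (w[l.toNat] :: PySem.List.slice w (some (l + 1)) (some r) ++ [w[r.toNat]]) 0
        · rw [if_pos (hcond.mpr hor), if_pos ((exDel_iff _ 0).mpr hor)]
        · rw [if_neg (fun hh => hor (hcond.mp hh)), if_neg (mt (exDel_iff _ 0).mp hor)]
    · rw [semiLoop, dif_neg hlt,
          if_pos (pal_short _ (win_short w l r h0 (by omega) hlr))]

-- ===== VERDICT (by name: the statement is the Claim_ definition above) =====
theorem isPalinOrSemiPalin_spec : Claim_equal_isPalinOrSemiPalin := by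
  intro w l r _hdom hpre
  unfold Spec_isPalinOrSemiPalin isPalinOrSemiPalin isPalinOrSemiPalin_alt
  by_cases hge : l ≥ r
  · simp only [hge, if_true]
    have : ¬ l < r := by omega
    rw [semiLoop]; simp [this]
  · have hlr : l < r := by omega
    rcases hpre with h | ⟨h0, hrlen⟩
    · omega
    · simp only [show ¬ l ≥ r by omega, if_false]
      rw [semiLoop_eq w.toList l r h0 hrlen (by omega), bruteLoop_eq]
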